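-- pv_equiv track=rewrite | github.com/woojin0103/alg | w2_test2.py | intersection_navie
-- ===== SOURCE A (Python) =====
-- def intersection_navie(A,B):
--     res = []
--     for j in A:
--         for k in B:
--             if j == k:
--                 res.append(k)
--                 B.remove(k)
--                 break
--     res = sorted(res)
--     return res
-- ===== SOURCE B (Python) =====
-- def intersection_navie(A, B):
--     # Counter-based multiset intersection: count B once, then one pass over A.
--     # (Note: the original mutates B in place; equivalence is about the return value.)
--     cb = {}
--     for x in B:
--         cb[x] = cb.get(x, 0) + 1
--     res = []
--     for x in A:
--         if cb.get(x, 0) > 0: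
--             cb[x] = cb.get(x, 0) - 1
--             res.append(x)
--     res.sort()
--     return res
-- ===== Notes on version B (the rewrite author's own statement) =====
-- stated objective: faster
-- what changed: Replaces the nested scan-and-remove over B (quadratic) by a hash counter of B built once, then a single pass over A decrementing counts, then sort.
import Mathlib
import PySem

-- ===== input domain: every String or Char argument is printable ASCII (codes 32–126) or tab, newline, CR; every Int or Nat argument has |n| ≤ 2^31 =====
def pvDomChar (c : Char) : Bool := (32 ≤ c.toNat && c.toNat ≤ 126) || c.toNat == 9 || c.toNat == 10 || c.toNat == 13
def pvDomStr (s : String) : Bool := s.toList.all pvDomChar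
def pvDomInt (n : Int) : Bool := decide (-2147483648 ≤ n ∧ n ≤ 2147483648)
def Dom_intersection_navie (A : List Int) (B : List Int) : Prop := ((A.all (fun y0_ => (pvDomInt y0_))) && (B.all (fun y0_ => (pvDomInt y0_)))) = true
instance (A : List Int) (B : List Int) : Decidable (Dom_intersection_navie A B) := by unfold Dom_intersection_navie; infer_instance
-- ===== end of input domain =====

-- B replaces A's nested scan-and-remove over B with a counter of B built once plus one pass
-- over A; equivalence is about the RETURN value only (A mutates its argument B in place).


-- ===== PORT A =====
-- inner 'for k in B: if j == k: … break' — find the first element of bs equal to j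
def pvScanB (j : Int) (bs : List Int) : Option Int :=
  match bs with
  | [] => none
  | k :: rest => if j = k then some k else pvScanB j rest

-- one iteration of the outer loop: append the found k to res and B.remove(k)
def pvStepA (st : List Int × List Int) (j : Int) : List Int × List Int :=
  match pvScanB j st.2 with
  | some k => (st.1 ++ [k], (PySem.List.remove? st.2 k).getD st.2)
  | none => st

def intersection_navie (A : List Int) (B : List Int) : List Int :=
  PySem.List.sorted (A.foldl pvStepA ([], B)).1 (fun x => x) false

-- ===== PORT B =====
-- one iteration of the A-pass: if cb.get(x,0) > 0 then decrement and append
def pvStepB (st : List Int × PySem.Dict Int Int) (x : Int) : List Int × PySem.Dict Int Int :=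
  if st.2.getD x 0 > 0 then (st.1 ++ [x], st.2.insert x (st.2.getD x 0 - 1)) else st

def intersection_navie_alt (A : List Int) (B : List Int) : List Int :=
  PySem.List.sorted (A.foldl pvStepB ([], B.foldl (fun d x => d.insert x (d.getD x 0 + 1)) PySem.Dict.empty)).1 (fun x => x) false

-- ===== PRECONDITION & SPEC =====
def Spec_intersection_navie (A : List Int) (B : List Int) (out : List Int) : Prop := out = intersection_navie_alt A B
instance (A : List Int) (B : List Int) (out : List Int) : Decidable (Spec_intersection_navie A B out) := by unfold Spec_intersection_navie; infer_instance

-- ===== CLAIM (what is proved, stated in full; the proofs are below) =====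
def Claim_equal_intersection_navie : Prop := ∀ (A : List Int) (B : List Int), Dom_intersection_navie A B → Spec_intersection_navie A B (intersection_navie A B)

-- ===== LEMMAS AND PROOFS =====

theorem pvScanB_of_mem {j : Int} {bs : List Int} (h : j ∈ bs) : pvScanB j bs = some j := by
  induction bs with
  | nil => cases h
  | cons k rest ih =>
    simp only [pvScanB]
    by_cases hjk : j = k
    · simp [hjk]
    · simp [hjk]; exact ih (by rcases List.mem_cons.mp h with h' | h'; exact absurd h' hjk; exact h')

theorem pvScanB_of_not_mem {j : Int} {bs : List Int} (h : j ∉ bs) : pvScanB j bs = none := by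
  induction bs with
  | nil => rfl
  | cons k rest ih =>
    simp only [pvScanB]
    have hjk : j ≠ k := fun e => h (e ▸ List.mem_cons_self ..)
    simp [hjk]; exact ih (fun hm => h (List.mem_cons_of_mem _ hm))

-- invariant: the counter holds exactly the multiplicities of the remaining list bs
def pvInv (bs : List Int) (d : PySem.Dict Int Int) : Prop :=
  ∀ x : Int, d.getD x 0 = (bs.count x : Int)

theorem pvFold_eq (A : List Int) (res : List Int) (bs : List Int) (d : PySem.Dict Int Int)
    (hinv : pvInv bs d) : (A.foldl pvStepA (res, bs)).1 = (A.foldl pvStepB (res, d)).1 := by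
  induction A generalizing res bs d with
  | nil => rfl
  | cons j rest ih =>
    simp only [List.foldl_cons]
    by_cases hm : j ∈ bs
    · have hcount : 0 < bs.count j := List.count_pos_iff.mpr hm
      have hA : pvStepA (res, bs) j = (res ++ [j], bs.erase j) := by
        simp [pvStepA, pvScanB_of_mem hm, PySem.List.remove?_eq_some_erase bs j hm]
      have hB : pvStepB (res, d) j = (res ++ [j], d.insert j (d.getD j 0 - 1)) := by
        simp only [pvStepB]
        rw [if_pos]
        rw [hinv j]; exact_mod_cast hcount
      rw [hA, hB]
      apply ih
      intro x
      rw [PySem.Dict.getD_insert]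
      by_cases hx : x = j
      · subst hx
        rw [if_pos rfl, hinv x, List.count_erase_self]
        have : 1 ≤ bs.count x := hcount
        omega
      · rw [if_neg hx, hinv x, List.count_erase_of_ne hx]
    · have hcz : bs.count j = 0 := List.count_eq_zero.mpr hm
      have hA : pvStepA (res, bs) j = (res, bs) := by
        simp only [pvStepA, pvScanB_of_not_mem hm]
      have hB : pvStepB (res, d) j = (res, d) := by
        simp only [pvStepB]
        rw [if_neg]
        rw [hinv j, hcz]; omega
      rw [hA, hB]
      exact ih res bs d hinv

-- ===== VERDICT (by name: the statement is the Claim_ definition above) =====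
theorem intersection_navie_spec : Claim_equal_intersection_navie := by
  intro A B _
  unfold Spec_intersection_navie intersection_navie intersection_navie_alt
  have hinv : pvInv B (B.foldl (fun d x => d.insert x (d.getD x 0 + 1)) PySem.Dict.empty) := by
    intro x
    rw [PySem.Dict.getD_foldl_insert_add_one, PySem.Dict.getD_empty]
    omega
  rw [pvFold_eq A [] B _ hinv]
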